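-- pv_equiv track=rewrite | github.com/pthomas92/VDJ-AA-Kmer-Similarity | scripts/makeKmers.py | findKmer
-- ===== SOURCE A (Python) =====
-- def findKmer(string, kmer):
--
--     """
--     Accessory function to kmerDecomp.
--     Breaks the given string up into subsequences of the length given in kmer
--     argument.
--
--     Args:
--         string- A character string of any length
--         kmer- A numeric value to define the size of the kmer
--
--     Returns:
--         mer- A list of kmers from the input string
--
--     """
--
--     mer = []
--
--     for position in range(0, len(string)):
--
--         int_ = string[position:(position + kmer)]
--
--         if len(int_) < kmer:
--
--             int_ = int_ + '.' * (kmer - len(int_))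
--
--         mer.append(int_)
--
--     return mer
-- ===== SOURCE B (Python) =====
-- def findKmer(string, kmer):
--     # Sliding window: each kmer is obtained from its predecessor by dropping the
--     # first character and appending the next incoming character (or '.'), so no
--     # per-position slice-then-maybe-pad of the source string happens in the loop.
--     n = len(string)
--     k = kmer if kmer > 0 else 0
--     window = string[:k] + '.' * (k - n)
--     mer = []
--     for p in range(n):
--         mer.append(window)
--         if k > 0:
--             window = window[1:] + (string[p + k] if p + k < n else '.')
--     return mer
-- ===== Notes on version B (the rewrite author's own statement) =====
-- stated objective: alternative
-- what changed: B maintains a sliding window: each kmer is obtained from the previous one by dropping its first character and appending the next incoming character (or '.'), instead of slicing the source and conditionally padding at every position. A kmer size is naturally a nonnegative count, so Pre_ restricts to that natural domain, excluding only negative kmer with -kmer < len(string), where Python treats p+kmer as a from-the-end slice stop (A returns truncated slices, B returns empty kmers).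
-- outside the precondition, e.g. on findKmer('abc', -1): A returns ['ab', '', ''], B returns ['', '', '']
import Mathlib
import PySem

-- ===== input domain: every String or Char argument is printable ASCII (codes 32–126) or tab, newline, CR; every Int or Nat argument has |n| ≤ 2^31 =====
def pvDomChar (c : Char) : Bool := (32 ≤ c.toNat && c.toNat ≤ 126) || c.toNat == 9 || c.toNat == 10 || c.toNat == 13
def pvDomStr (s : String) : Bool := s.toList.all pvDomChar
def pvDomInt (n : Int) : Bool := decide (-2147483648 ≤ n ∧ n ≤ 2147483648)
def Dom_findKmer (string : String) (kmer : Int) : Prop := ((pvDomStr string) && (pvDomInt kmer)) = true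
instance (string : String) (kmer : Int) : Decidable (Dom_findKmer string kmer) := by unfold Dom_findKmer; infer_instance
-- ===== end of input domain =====

-- B replaces slice-then-pad at every position by a sliding window updated in place
-- (drop first char, append next char or '.'); objective: alternative algorithm, same cost.

-- ===== PORT A =====
def findKmer (string : String) (kmer : Int) : List String :=
  (PySem.List.pyRange 0 (PySem.Str.len string) 1).foldl
    (fun mer position =>
      let int0 := PySem.List.slice string.toList (some position) (some (position + kmer))
      let int1 := if (int0.length : Int) < kmer
                  then int0 ++ PySem.List.pyRepeat ['.'] (kmer - int0.length)
                  else int0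
      mer ++ [String.ofList int1]) []

-- ===== PORT B =====
def findKmer_alt (string : String) (kmer : Int) : List String :=
  let cs := string.toList
  let n : Int := PySem.Str.len string
  let k : Int := if kmer > 0 then kmer else 0
  let window0 := PySem.List.slice cs none (some k) ++ PySem.List.pyRepeat ['.'] (k - n)
  let res := (PySem.List.pyRange 0 n 1).foldl
    (fun (st : List String × List Char) p =>
      let mer' := st.1 ++ [String.ofList st.2]
      let window' := if 0 < k then
          PySem.List.slice st.2 (some 1) none ++
            [if p + k < n then (PySem.List.pyGet? cs (p + k)).getD '.' else '.']
        else st.2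
      (mer', window')) ([], window0)
  res.1

-- ===== PRECONDITION & SPEC =====
-- A kmer size is naturally a nonnegative count; Pre_ restricts to that natural domain,
-- excluding only the negative kmer with -kmer < len(string), where Python treats p+kmer as a
-- from-the-end slice stop (A returns truncated slices, B returns empty kmers).
def Pre_findKmer (string : String) (kmer : Int) : Prop :=
  0 ≤ kmer ∨ PySem.Str.len string + kmer ≤ 0
instance (string : String) (kmer : Int) : Decidable (Pre_findKmer string kmer) := by unfold Pre_findKmer; infer_instance
def pvWitness_findKmer : String × Int := ("abc", 2)

def Spec_findKmer (string : String) (kmer : Int) (out : List String) : Prop := out = findKmer_alt string kmer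
instance (string : String) (kmer : Int) (out : List String) : Decidable (Spec_findKmer string kmer out) := by unfold Spec_findKmer; infer_instance

-- ===== CLAIM (what is proved, stated in full; the proofs are below) =====
def Claim_equal_findKmer : Prop := ∀ (string : String) (kmer : Int), Dom_findKmer string kmer → Pre_findKmer string kmer → Spec_findKmer string kmer (findKmer string kmer)

-- ===== LEMMAS AND PROOFS =====

-- the window contents at position p (K = kmer as a Nat)
def pvWin (cs : List Char) (K p : Nat) : List Char :=
  ((cs.drop p) ++ List.replicate K '.').take K

-- A's loop body at an in-range position computes exactly the window at that position
lemma pvA_elem (cs : List Char) (K p : Nat) (hp : p < cs.length) :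
    (if ((PySem.List.slice cs (some (p : Int)) (some ((p : Int) + (K : Int)))).length : Int) < (K : Int)
     then PySem.List.slice cs (some (p : Int)) (some ((p : Int) + (K : Int))) ++
          PySem.List.pyRepeat ['.'] ((K : Int) - (PySem.List.slice cs (some (p : Int)) (some ((p : Int) + (K : Int)))).length)
     else PySem.List.slice cs (some (p : Int)) (some ((p : Int) + (K : Int))))
    = pvWin cs K p := by
  rw [PySem.List.slice_natCast_add]
  have hlen : ((cs.drop p).take K).length = min K (cs.length - p) := by
    simp [List.length_take, List.length_drop]
  rw [pvWin, List.take_append, List.take_replicate]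
  by_cases h : cs.length - p < K
  · have hcond : ((((cs.drop p).take K).length : Nat) : Int) < (K : Int) := by
      rw [hlen]; omega
    rw [if_pos hcond, PySem.List.pyRepeat_singleton]
    have h1 : (cs.drop p).take K = cs.drop p := List.take_of_length_le (by simp; omega)
    rw [h1]
    have h2 : ((K : Int) - ((List.drop p cs).length : Int)).toNat = min (K - (List.drop p cs).length) K := by
      simp only [List.length_drop]; omega
    rw [h2]
  · have hcond : ¬ ((((cs.drop p).take K).length : Nat) : Int) < (K : Int) := by
      rw [hlen]; omega
    rw [if_neg hcond]
    rw [hlen] at hcond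
    have h0 : K - (cs.length - p) = 0 := by omega
    simp [h0]

-- sliding one step: dropping the first char and appending the incoming char turns
-- the window at p into the window at p+1
-- sliding one step: dropping the first char and appending the incoming char turns
-- the window at p into the window at p+1
lemma pvWin_step (cs : List Char) (K p : Nat) (hp : p < cs.length) (hK : 0 < K) :
    (pvWin cs K p).drop 1 ++
      [if ((p : Int) + (K : Int)) < (cs.length : Int)
       then (PySem.List.pyGet? cs ((p : Int) + (K : Int))).getD '.' else '.']
    = pvWin cs K (p + 1) := by
  have hget : ((p : Int) + (K : Int)) = (((p + K : Nat) : Int)) := by push_cast; ring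
  have hd : cs.drop p ≠ [] := by simp at *; omega
  obtain ⟨c, tl, hct⟩ := List.exists_cons_of_ne_nil hd
  have htl : tl = cs.drop (p + 1) := by
    have := congrArg (List.drop 1) hct
    simpa [List.drop_drop] using this.symm
  have hdrop : (pvWin cs K p).drop 1 = ((cs.drop (p+1)) ++ List.replicate K '.').take (K - 1) := by
    rw [pvWin, List.drop_take, hct]
    simp [htl]
  rw [hdrop]
  have hsrc : ((cs.drop (p+1)) ++ List.replicate K '.').length = cs.length - (p+1) + K := by
    simp [List.length_drop]
  have hKle : K ≤ ((cs.drop (p+1)) ++ List.replicate K '.').length := by rw [hsrc]; omega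
  have htake : ((cs.drop (p+1)) ++ List.replicate K '.').take K
      = ((cs.drop (p+1)) ++ List.replicate K '.').take (K - 1)
        ++ [((cs.drop (p+1)) ++ List.replicate K '.')[K-1]'(by omega)] := by
    have h2 := List.take_add_one (l := (cs.drop (p+1)) ++ List.replicate K '.') (i := K - 1)
    have hK1 : K - 1 + 1 = K := by omega
    rw [hK1] at h2
    rw [h2]
    have h3 : ((cs.drop (p+1)) ++ List.replicate K '.')[K-1]? =
        some (((cs.drop (p+1)) ++ List.replicate K '.')[K-1]'(by omega)) :=
      List.getElem?_eq_getElem (by omega)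
    simp [h3]
  have helem : ((cs.drop (p+1)) ++ List.replicate K '.')[K-1]'(by omega)
      = (if ((p : Int) + (K : Int)) < (cs.length : Int)
         then (PySem.List.pyGet? cs ((p : Int) + (K : Int))).getD '.' else '.') := by
    by_cases hc : p + K < cs.length
    · have hcI : ((p : Int) + (K : Int)) < (cs.length : Int) := by omega
      rw [if_pos hcI, hget]
      have hidx : K - 1 < (cs.drop (p+1)).length := by simp [List.length_drop]; omega
      rw [List.getElem_append_left hidx]
      have h4 : PySem.List.pyGet? cs (((p + K : Nat) : Int)) = some (cs[p+K]'hc) :=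
        PySem.List.pyGet?_ofNat cs (p+K) hc
      rw [h4, List.getElem_drop]
      simp only [Option.getD_some]
      congr 1
      omega
    · have hcI : ¬ ((p : Int) + (K : Int)) < (cs.length : Int) := by omega
      rw [if_neg hcI]
      have hidx : ¬ K - 1 < (cs.drop (p+1)).length := by simp [List.length_drop]; omega
      rw [List.getElem_append_right (by omega)]
      simp
  rw [show pvWin cs K (p+1) = ((cs.drop (p+1)) ++ List.replicate K '.').take K from rfl, htake, helem]

-- the initial window equals the window at position 0
lemma pvWin_zero (cs : List Char) (K : Nat) :
    PySem.List.slice cs none (some (K : Int)) ++ PySem.List.pyRepeat ['.'] ((K : Int) - (cs.length : Int))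
    = pvWin cs K 0 := by
  rw [PySem.List.slice_to_natCast, PySem.List.pyRepeat_singleton, pvWin,
      List.drop_zero, List.take_append, List.take_replicate]
  congr 2
  omega

-- B's fold unrolled: starting from the window at a, the first component collects the
-- windows at a, a+1, …, n-1
lemma pvFold (cs : List Char) (K : Nat) (a : Nat) (acc : List String)
    (ha : a ≤ cs.length) :
    ((PySem.List.pyRange (a : Int) (cs.length : Int) 1).foldl
      (fun (st : List String × List Char) p =>
        (st.1 ++ [String.ofList st.2],
         if 0 < (K : Int) then
           PySem.List.slice st.2 (some 1) none ++
             [if p + (K : Int) < (cs.length : Int)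
              then (PySem.List.pyGet? cs (p + (K : Int))).getD '.' else '.']
         else st.2)) (acc, pvWin cs K a)).1
    = acc ++ (List.range (cs.length - a)).map (fun i => String.ofList (pvWin cs K (a + i))) := by
  by_cases h : a < cs.length
  · rw [PySem.List.pyRange_one_cons (by exact_mod_cast h)]
    have hstep : (if 0 < (K : Int) then
        PySem.List.slice (pvWin cs K a) (some 1) none ++
          [if (a : Int) + (K : Int) < (cs.length : Int)
           then (PySem.List.pyGet? cs ((a : Int) + (K : Int))).getD '.' else '.']
        else pvWin cs K a) = pvWin cs K (a + 1) := by
      by_cases hK : 0 < K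
      · rw [if_pos (by exact_mod_cast hK), PySem.List.slice_from_one]
        have := pvWin_step cs K a h hK
        simpa [List.drop_one] using this
      · have hK0 : K = 0 := by omega
        rw [if_neg (by simp [hK0])]
        simp [pvWin, hK0]
    simp only [List.foldl_cons, hstep]
    have hcast : ((a : Int) + 1) = (((a + 1 : Nat)) : Int) := by push_cast; ring
    rw [hcast, pvFold cs K (a + 1) (acc ++ [String.ofList (pvWin cs K a)]) (by omega)]
    have hr : cs.length - a = (cs.length - (a + 1)) + 1 := by omega
    rw [hr, List.range_succ_eq_map]
    simp [List.map_map, Function.comp, Nat.add_comm, Nat.add_left_comm]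
  · have he : cs.length ≤ a := by omega
    rw [PySem.List.pyRange_one_eq_nil (by exact_mod_cast he)]
    have : cs.length - a = 0 := by omega
    simp [this]
termination_by cs.length - a
decreasing_by omega

lemma pvA_eq (string : String) (kmer : Int) (h : 0 ≤ kmer) :
    findKmer string kmer
    = (List.range string.toList.length).map (fun i => String.ofList (pvWin string.toList kmer.toNat i)) := by
  obtain ⟨K, hK⟩ : ∃ K : Nat, kmer = (K : Int) := ⟨kmer.toNat, by omega⟩
  subst hK
  rw [findKmer]
  rw [PySem.List.foldl_append_singleton_eq_map]
  have hlen : PySem.Str.len string = (string.toList.length : Int) := PySem.Str.len_eq string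
  rw [hlen, PySem.List.pyRange_zero_natCast, List.map_map, List.nil_append]
  apply List.map_congr_left
  intro p hp
  rw [List.mem_range] at hp
  simp only [Function.comp, Int.toNat_natCast]
  exact congrArg String.ofList (pvA_elem string.toList K p hp)

lemma pvB_eq (string : String) (kmer : Int) (h : 0 ≤ kmer) :
    findKmer_alt string kmer
    = (List.range string.toList.length).map (fun i => String.ofList (pvWin string.toList kmer.toNat i)) := by
  obtain ⟨K, hK⟩ : ∃ K : Nat, kmer = (K : Int) := ⟨kmer.toNat, by omega⟩
  subst hK
  rw [findKmer_alt]
  have hlen : PySem.Str.len string = (string.toList.length : Int) := PySem.Str.len_eq string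
  simp only [hlen]
  have hk : (if (K : Int) > 0 then (K : Int) else 0) = (K : Int) := by
    split_ifs with hx
    · rfl
    · omega
  simp only [hk]
  rw [pvWin_zero string.toList K]
  have := pvFold string.toList K 0 [] (Nat.zero_le _)
  simp only [Nat.sub_zero, Nat.zero_add, List.nil_append] at this
  rw [show ((0 : Int) = ((0 : Nat) : Int)) from rfl] at this ⊢
  rw [this]
  simp [Int.toNat_natCast]

-- negative kmer admitted by Pre_ (kmer ≤ -len): every slice of A is empty and B's
-- window is empty, so both return one empty string per position
lemma pvA_neg (string : String) (kmer : Int) (hk : kmer < 0)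
    (hle : (string.toList.length : Int) + kmer ≤ 0) :
    findKmer string kmer = (List.range string.toList.length).map (fun _ => "") := by
  rw [findKmer, PySem.List.foldl_append_singleton_eq_map]
  rw [PySem.Str.len_eq, PySem.List.pyRange_zero_natCast, List.map_map, List.nil_append]
  apply List.map_congr_left
  intro p hp
  rw [List.mem_range] at hp
  simp only [Function.comp]
  have hempty : PySem.List.slice string.toList (some (p : Int)) (some ((p : Int) + kmer)) = [] := by
    apply List.eq_nil_of_length_eq_zero
    rw [PySem.List.length_slice]
    have hA : PySem.List.clampIdx string.toList.length (p : Int) = p := by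
      rw [PySem.List.clampIdx_natCast]
      omega
    have hB : PySem.List.clampIdx string.toList.length ((p : Int) + kmer) ≤ p := by
      simp only [PySem.List.clampIdx]
      split_ifs <;> omega
    omega
  rw [hempty]
  have hc : ¬ ((([] : List Char).length : Int) < kmer) := by simp; omega
  rw [if_neg hc]

lemma pvB_neg (string : String) (kmer : Int) (hk : kmer < 0) :
    findKmer_alt string kmer = (List.range string.toList.length).map (fun _ => "") := by
  rw [findKmer_alt]
  have hlen : PySem.Str.len string = (string.toList.length : Int) := PySem.Str.len_eq string
  simp only [hlen]
  have hkcond : ¬ (kmer > 0) := by omega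
  simp only [if_neg hkcond]
  have hw0 : PySem.List.slice string.toList none (some (0 : Int)) ++
      PySem.List.pyRepeat ['.'] (0 - (string.toList.length : Int)) = pvWin string.toList 0 0 := by
    have := pvWin_zero string.toList 0
    simpa using this
  rw [hw0]
  have hfold := pvFold string.toList 0 0 [] (Nat.zero_le _)
  simp only [Nat.cast_zero, Nat.sub_zero, Nat.zero_add, List.nil_append] at hfold
  rw [show ((0 : Int) = ((0 : Nat) : Int)) from rfl] at hfold ⊢
  rw [hfold]
  simp [pvWin]

-- ===== VERDICT (by name: the statement is the Claim_ definition above) =====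
theorem findKmer_spec : Claim_equal_findKmer := by
  intro s k _ hpre
  unfold Spec_findKmer
  by_cases h : 0 ≤ k
  · rw [pvA_eq s k h, pvB_eq s k h]
  · have hk : k < 0 := by omega
    have hle : (s.toList.length : Int) + k ≤ 0 := by
      rcases hpre with h0 | h0
      · omega
      · rw [PySem.Str.len_eq] at h0; exact h0
    rw [pvA_neg s k hk hle, pvB_neg s k hk]
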